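-- pv_equiv track=rewrite | github.com/mk9km/basic_exercises | for_dict_challenges_bonus.py | get_user_ids_with_max_messages
-- ===== SOURCE A (Python) =====
-- from typing import Dict, Tuple
--
-- def get_user_ids_with_max_messages(messages: Dict) -> Tuple:
--     message_num_to_user = {}
--     max_user_ids, max_message_num = {}, 0
--
--     for message in messages:
--         user_id = message['sent_by']
--         message_num_to_user[user_id] = message_num_to_user.get(user_id, 0) + 1
--
--         if max_message_num < message_num_to_user[user_id]:
--             max_user_ids, max_message_num = {user_id}, message_num_to_user[user_id]
--         elif max_message_num == message_num_to_user[user_id]: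
--             max_user_ids.add(user_id)
--
--     return max_user_ids, max_message_num
-- ===== SOURCE B (Python) =====
-- def get_user_ids_with_max_messages(messages):
--     counts = {}
--     for message in messages:
--         user_id = message['sent_by']
--         counts[user_id] = counts.get(user_id, 0) + 1
--
--     if not counts:
--         return set(), 0
--
--     max_message_num = max(counts.values())
--     max_user_ids = {u for u, c in counts.items() if c == max_message_num}
--     return max_user_ids, max_message_num
-- ===== Notes on version B (the rewrite author's own statement) =====
-- stated objective: simpler
-- what changed: A fuses counting with on-line maximum tracking (resetting the winner set whenever a new maximum appears); B builds the complete count table in one pass, reads the maximum off it with max(), and filters the table for the winners. …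
-- outside the precondition, e.g. on get_user_ids_with_max_messages([]): A returns ({}, 0), B returns (set(), 0)
import Mathlib
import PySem

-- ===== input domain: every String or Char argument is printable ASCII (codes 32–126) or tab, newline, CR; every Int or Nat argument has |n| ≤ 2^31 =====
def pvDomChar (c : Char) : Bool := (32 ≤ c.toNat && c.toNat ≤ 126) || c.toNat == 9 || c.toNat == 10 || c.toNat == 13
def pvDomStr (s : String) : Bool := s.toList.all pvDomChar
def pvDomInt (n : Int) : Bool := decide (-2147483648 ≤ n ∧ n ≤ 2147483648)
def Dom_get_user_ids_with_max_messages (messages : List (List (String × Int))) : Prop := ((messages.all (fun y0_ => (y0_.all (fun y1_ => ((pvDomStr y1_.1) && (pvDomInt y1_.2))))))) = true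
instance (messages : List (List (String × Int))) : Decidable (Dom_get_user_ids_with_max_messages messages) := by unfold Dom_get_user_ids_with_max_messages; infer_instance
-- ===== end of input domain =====

-- B replaces A's fused count-and-track-max loop (which resets the winner set whenever a new
-- maximum appears) by: build the full count table, read the maximum off it with max(), filter
-- the table for the winners.

-- shared helper: message['sent_by'] (getD 0 is only reached outside Pre_, where Python raises KeyError)
def pvSentBy (message : List (String × Int)) : Int :=
  ((PySem.Dict.mk message).get? "sent_by").getD 0

-- ===== PORT A =====
-- loop body of A (state: message_num_to_user, max_user_ids, max_message_num)
def pvAStep (st : PySem.Dict Int Int × PySem.Set Int × Int) (user_id : Int) :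
    PySem.Dict Int Int × PySem.Set Int × Int :=
  let m2u := st.1.insert user_id (st.1.getD user_id 0 + 1)
  let c := m2u.getD user_id 0
  if st.2.2 < c then (m2u, PySem.Set.add PySem.Set.empty user_id, c)
  else if st.2.2 = c then (m2u, PySem.Set.add st.2.1 user_id, st.2.2)
  else (m2u, st.2.1, st.2.2)

def get_user_ids_with_max_messages (messages : List (List (String × Int))) : List Int × Int :=
  let st := messages.foldl (fun st message => pvAStep st (pvSentBy message))
    (PySem.Dict.empty, PySem.Set.empty, 0)
  (st.2.1, st.2.2)

-- ===== PORT B =====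
def get_user_ids_with_max_messages_alt (messages : List (List (String × Int))) : List Int × Int :=
  let counts := messages.foldl
    (fun counts message => counts.insert (pvSentBy message) (counts.getD (pvSentBy message) 0 + 1))
    PySem.Dict.empty
  if counts.size = 0 then (PySem.Set.empty, 0)
  else
    let max_message_num := ((PySem.List.max? counts.values (fun v => v)).getD 0 : Int)
    -- {u for u, c in counts.items() if c == max_message_num}
    let max_user_ids := counts.items.foldl
      (fun s p => if p.2 == max_message_num then PySem.Set.add s p.1 else s) PySem.Set.empty
    (max_user_ids, max_message_num)

-- ===== PRECONDITION & SPEC =====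
-- helpers used only to state the precondition
def pvIds (messages : List (List (String × Int))) : List Int := messages.map pvSentBy
-- the largest number of occurrences of any element of l
def pvMaxCount (l : List Int) : Nat := (l.map (fun u => l.count u)).foldl max 0
-- the maximally frequent elements, in order of first occurrence / in order of last occurrence
def pvWinnersFirst (l : List Int) : List Int :=
  (PySem.Set.ofList l).filter (fun u => l.count u == pvMaxCount l)
def pvWinnersLast (l : List Int) : List Int :=
  ((PySem.Set.ofList l.reverse).reverse).filter (fun u => l.count u == pvMaxCount l)

-- Pre_ excludes: the empty list (Python A returns ({}, 0) — an empty DICT where the declared type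
-- promises a set; B returns (set(), 0)); messages lacking a 'sent_by' key (A raises KeyError); and
-- inputs on which the tied maximal users' first-occurrence order differs from their last-occurrence
-- order — there A and B return the SAME Python set, but the List model of a set must fix an element
-- order Python leaves unspecified, and A's order (last occurrence) differs from B's (first occurrence).
def Pre_get_user_ids_with_max_messages (messages : List (List (String × Int))) : Prop :=
  messages ≠ [] ∧
  messages.all (fun message => (PySem.Dict.mk message).contains "sent_by") = true ∧
  pvWinnersFirst (pvIds messages) = pvWinnersLast (pvIds messages)
instance (messages : List (List (String × Int))) : Decidable (Pre_get_user_ids_with_max_messages messages) := by unfold Pre_get_user_ids_with_max_messages; infer_instance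

def pvWitness_get_user_ids_with_max_messages : (List (List (String × Int))) :=
  [[("sent_by", 7)], [("sent_by", 7)], [("sent_by", 3)]]

def Spec_get_user_ids_with_max_messages (messages : List (List (String × Int))) (out : List Int × Int) : Prop := out = get_user_ids_with_max_messages_alt messages
instance (messages : List (List (String × Int))) (out : List Int × Int) : Decidable (Spec_get_user_ids_with_max_messages messages out) := by unfold Spec_get_user_ids_with_max_messages; infer_instance

-- ===== CLAIM (what is proved, stated in full; the proofs are below) =====
def Claim_equal_get_user_ids_with_max_messages : Prop := ∀ (messages : List (List (String × Int))), Dom_get_user_ids_with_max_messages messages → Pre_get_user_ids_with_max_messages messages → Spec_get_user_ids_with_max_messages messages (get_user_ids_with_max_messages messages)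

-- ===== LEMMAS AND PROOFS =====

-- the fold of A over the extracted user-id list
def pvA (l : List Int) : PySem.Dict Int Int × PySem.Set Int × Int :=
  l.foldl pvAStep (PySem.Dict.empty, PySem.Set.empty, 0)

-- distinct elements in order of last occurrence
def pvLast (l : List Int) : List Int := (PySem.Set.ofList l.reverse).reverse

-- Set.add folded from a general accumulator
theorem pvFoldAdd (xs : List Int) : ∀ acc : List Int,
    xs.foldl PySem.Set.add acc = acc ++ (xs.foldl PySem.Set.add []).filter (fun v => !acc.contains v) := by
  induction xs with
  | nil => intro acc; simp
  | cons x xs ih =>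
      intro acc
      simp only [List.foldl_cons]
      rw [ih (PySem.Set.add acc x), ih (PySem.Set.add [] x)]
      have hadd0 : PySem.Set.add ([] : List Int) x = [x] := by
        simp [PySem.Set.add, PySem.Set.contains]
      rw [hadd0]
      by_cases hm : x ∈ acc
      · have hadd : PySem.Set.add acc x = acc := by
          simp [PySem.Set.add, PySem.Set.contains, hm]
        have hbx : (!acc.contains x) = false := by simp [hm]
        rw [hadd]
        simp only [List.filter_append, List.filter_cons]
        simp only [hbx, List.filter_filter, if_neg Bool.false_ne_true]
        refine congrArg (acc ++ ·) (List.filter_congr ?_)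
        intro v hv
        by_cases hvx : v = x
        · subst hvx; simp [hm]
        · simp [hvx]
      · have hadd : PySem.Set.add acc x = acc ++ [x] := by
          simp [PySem.Set.add, PySem.Set.contains, hm]
        have hbx : (!acc.contains x) = true := by simp [hm]
        rw [hadd]
        simp only [List.filter_append, List.filter_cons, List.filter_filter, List.append_assoc]
        simp only [hbx]
        refine congrArg (acc ++ ·) (congrArg (x :: ·) (List.filter_congr ?_))
        intro v hv
        by_cases hvx : v = x
        · subst hvx; simp [hm]
        · simp [hvx]

theorem pvOfListCons (x : Int) (xs : List Int) :
    PySem.Set.ofList (x :: xs) = x :: (PySem.Set.ofList xs).filter (fun v => !(v == x)) := by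
  rw [PySem.Set.ofList_eq_foldl, PySem.Set.ofList_eq_foldl]
  simp only [List.foldl_cons]
  have hadd0 : PySem.Set.add ([] : List Int) x = [x] := by
    simp [PySem.Set.add, PySem.Set.contains]
  rw [hadd0, pvFoldAdd]
  refine congrArg (x :: ·) (List.filter_congr ?_)
  intro v _
  by_cases h : v = x <;> simp [h]

theorem pvLast_append (l : List Int) (u : Int) :
    pvLast (l ++ [u]) = (pvLast l).filter (fun v => !(v == u)) ++ [u] := by
  unfold pvLast
  rw [List.reverse_append]
  simp only [List.reverse_singleton, List.singleton_append, pvOfListCons]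
  simp [List.filter_reverse]

-- fold collecting the elements of a Nodup list that satisfy a predicate into a set
theorem pvFoldAddFilter (ks : List Int) (p : Int → Bool) :
    ∀ acc : List Int, ks.Nodup → (∀ k ∈ ks, k ∉ acc) →
    ks.foldl (fun s k => if p k then PySem.Set.add s k else s) acc = acc ++ ks.filter p := by
  induction ks with
  | nil => intro acc _ _; simp
  | cons k ks ih =>
      intro acc hnd hdis
      simp only [List.foldl_cons, List.filter_cons]
      by_cases hp : p k = true
      · have hadd : PySem.Set.add acc k = acc ++ [k] := by
          simp [PySem.Set.add, PySem.Set.contains, hdis k (by simp)]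
        rw [if_pos hp, hadd, ih (acc ++ [k]) (List.Nodup.of_cons hnd)]
        · simp [hp]
        · intro a ha
          simp only [List.mem_append, List.mem_singleton]
          push Not
          exact ⟨hdis a (by simp [ha]), fun h => (List.nodup_cons.mp hnd).1 (h ▸ ha)⟩
      · rw [if_neg hp, ih acc (List.Nodup.of_cons hnd) (fun a ha => hdis a (by simp [ha]))]
        simp [hp]

-- invariant of A's loop: the dict counts, the max is the largest count (attained), and the
-- winner set is the maximally frequent users in order of last occurrence
theorem pvAInv (l : List Int) :
    (∀ k, (pvA l).1.getD k 0 = (l.count k : Int)) ∧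
    0 ≤ (pvA l).2.2 ∧
    (l = [] → (pvA l).2.2 = 0) ∧
    (∀ k, (l.count k : Int) ≤ (pvA l).2.2) ∧
    (l ≠ [] → ∃ k ∈ l, (l.count k : Int) = (pvA l).2.2) ∧
    (pvA l).2.1 = (pvLast l).filter (fun u => ((l.count u : Int) == (pvA l).2.2)) := by
  induction l using List.reverseRecOn with
  | nil =>
      refine ⟨?_, le_refl 0, fun _ => rfl, ?_, by simp, rfl⟩
      · intro k; simp [pvA, PySem.Dict.getD_empty]
      · intro k; simp [pvA]
  | append_singleton l u ih =>
      obtain ⟨hd, hnn, h0, hle, hat, hset⟩ := ih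
      have hA : pvA (l ++ [u]) = pvAStep (pvA l) u := by
        simp [pvA, List.foldl_append]
      have hcnt : ∀ k, ((l ++ [u]).count k : Int) =
          (if k = u then (l.count k : Int) + 1 else (l.count k : Int)) := by
        intro k
        by_cases hk : k = u
        · simp [List.count_append, hk]
        · simp [List.count_append, hk, List.count_eq_zero]
      have hdict : ∀ k, ((pvA l).1.insert u ((pvA l).1.getD u 0 + 1)).getD k 0 =
          ((l ++ [u]).count k : Int) := by
        intro k
        rw [PySem.Dict.getD_insert, hcnt k, hd k]
        by_cases hk : k = u <;> simp [hk, hd u]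
      have hc : ((pvA l).1.insert u ((pvA l).1.getD u 0 + 1)).getD u 0 = (l.count u : Int) + 1 := by
        rw [hdict u, hcnt u]; simp
      have hstep : pvAStep (pvA l) u =
          (((pvA l).1.insert u ((pvA l).1.getD u 0 + 1)),
            (if (pvA l).2.2 < (l.count u : Int) + 1 then PySem.Set.add PySem.Set.empty u
             else if (pvA l).2.2 = (l.count u : Int) + 1 then PySem.Set.add (pvA l).2.1 u
             else (pvA l).2.1),
            (if (pvA l).2.2 < (l.count u : Int) + 1 then (l.count u : Int) + 1 else (pvA l).2.2)) := by
        simp only [pvAStep, hc]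
        split_ifs <;> rfl
      rcases lt_trichotomy ((pvA l).2.2) ((l.count u : Int) + 1) with hlt | heq | hgt
      · -- new maximum, set becomes [u]
        have hs : pvA (l ++ [u]) =
            (((pvA l).1.insert u ((pvA l).1.getD u 0 + 1)), [u], (l.count u : Int) + 1) := by
          rw [hA, hstep, if_pos hlt, if_pos hlt]
          rfl
        rw [hs]
        refine ⟨hdict, ?_, by simp, ?_, ?_, ?_⟩
        · dsimp only; have := Int.natCast_nonneg (l.count u); omega
        · intro k; dsimp only; rw [hcnt k]; split_ifs with hk
          · subst hk; omega
          · have := hle k; omega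
        · intro _
          refine ⟨u, by simp, ?_⟩
          dsimp only; rw [hcnt u]; simp
        · dsimp only
          rw [pvLast_append, List.filter_append]
          have h1 : ((pvLast l).filter (fun v => !(v == u))).filter
              (fun v => (((l ++ [u]).count v : Int) == (l.count u : Int) + 1)) = [] := by
            apply List.eq_nil_iff_forall_not_mem.mpr
            intro v hv
            simp only [List.mem_filter] at hv
            obtain ⟨⟨_, hvu'⟩, hb⟩ := hv
            have hvu : v ≠ u := by simpa using hvu'
            rw [hcnt v, if_neg hvu] at hb
            have hbe : (l.count v : Int) = (l.count u : Int) + 1 := by simpa using hb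
            have := hle v; omega
          have h2 : [u].filter (fun v => (((l ++ [u]).count v : Int) == (l.count u : Int) + 1)) = [u] := by
            simp
          rw [h1, h2]
          simp
      · -- tie: append u to the winner set
        have hs : pvA (l ++ [u]) =
            (((pvA l).1.insert u ((pvA l).1.getD u 0 + 1)),
              PySem.Set.add (pvA l).2.1 u, (pvA l).2.2) := by
          have hnlt : ¬ ((pvA l).2.2 < (l.count u : Int) + 1) := by omega
          rw [hA, hstep, if_neg hnlt, if_pos heq, if_neg hnlt]
        have hunotin : u ∉ (pvA l).2.1 := by
          rw [hset]
          intro hmem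
          have := (List.mem_filter.mp hmem).2
          have : (l.count u : Int) = (pvA l).2.2 := by simpa using this
          omega
        have hadd : PySem.Set.add (pvA l).2.1 u = (pvA l).2.1 ++ [u] := by
          simp [PySem.Set.add, PySem.Set.contains, hunotin]
        rw [hs]
        refine ⟨hdict, hnn, by simp, ?_, ?_, ?_⟩
        · intro k; dsimp only; rw [hcnt k]; split_ifs with hk
          · subst hk; omega
          · exact hle k
        · intro _
          refine ⟨u, by simp, ?_⟩
          dsimp only; rw [hcnt u]; simp; omega
        · dsimp only
          rw [hadd, pvLast_append, List.filter_append]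
          have h2 : [u].filter (fun v => (((l ++ [u]).count v : Int) == (pvA l).2.2)) = [u] := by
            simp; omega
          have h1 : ((pvLast l).filter (fun v => !(v == u))).filter
              (fun v => (((l ++ [u]).count v : Int) == (pvA l).2.2)) = (pvA l).2.1 := by
            rw [List.filter_filter, hset]
            apply List.filter_congr
            intro v hv
            by_cases hvu : v = u
            · subst hvu
              have : ((l.count v : Int) == (pvA l).2.2) = false := by simp; omega
              simp [this]
            · rw [hcnt v, if_neg hvu]
              simp [hvu]
          rw [h1, h2]
      · -- below the maximum: nothing changes
        have hs : pvA (l ++ [u]) =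
            (((pvA l).1.insert u ((pvA l).1.getD u 0 + 1)), (pvA l).2.1, (pvA l).2.2) := by
          have hnlt : ¬ ((pvA l).2.2 < (l.count u : Int) + 1) := by omega
          have hne : ¬ ((pvA l).2.2 = (l.count u : Int) + 1) := by omega
          rw [hA, hstep, if_neg hnlt, if_neg hne, if_neg hnlt]
        have hlne : l ≠ [] := by
          intro h
          have := h0 h
          have := Int.natCast_nonneg (l.count u)
          omega
        rw [hs]
        refine ⟨hdict, hnn, by simp, ?_, ?_, ?_⟩
        · intro k; dsimp only; rw [hcnt k]; split_ifs with hk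
          · subst hk; omega
          · exact hle k
        · intro _
          obtain ⟨k, hkmem, hkeq⟩ := hat hlne
          have hku : k ≠ u := by
            intro h; subst h; omega
          refine ⟨k, by simp [hkmem], ?_⟩
          dsimp only; rw [hcnt k, if_neg hku]; exact hkeq
        · dsimp only
          rw [pvLast_append, List.filter_append]
          have h2 : [u].filter (fun v => (((l ++ [u]).count v : Int) == (pvA l).2.2)) = [] := by
            simp; omega
          have h1 : ((pvLast l).filter (fun v => !(v == u))).filter
              (fun v => (((l ++ [u]).count v : Int) == (pvA l).2.2)) = (pvA l).2.1 := by
            rw [List.filter_filter, hset]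
            apply List.filter_congr
            intro v hv
            by_cases hvu : v = u
            · subst hvu
              have : ((l.count v : Int) == (pvA l).2.2) = false := by simp; omega
              simp [this]
            · rw [hcnt v, if_neg hvu]
              simp [hvu]
          rw [h1, h2]
          simp

theorem pvFoldMaxLe (xs : List Nat) : ∀ a K : Nat, a ≤ K → (∀ x ∈ xs, x ≤ K) → xs.foldl max a ≤ K := by
  induction xs with
  | nil => intro a K ha _; simpa using ha
  | cons x xs ih =>
      intro a K ha h
      simp only [List.foldl_cons]
      exact ih _ K (max_le ha (h x (by simp))) (fun y hy => h y (by simp [hy]))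

theorem pvMaxCount_eq (l : List Int) (k0 : Int) (hk0 : k0 ∈ l)
    (hmax : ∀ k, l.count k ≤ l.count k0) : pvMaxCount l = l.count k0 := by
  refine le_antisymm ?_ ?_
  · exact pvFoldMaxLe _ 0 _ (Nat.zero_le _)
      (fun x hx => by obtain ⟨v, _, rfl⟩ := List.mem_map.mp hx; exact hmax v)
  · exact (PySem.List.le_foldl_max _ 0).2 _ (List.mem_map.mpr ⟨k0, hk0, rfl⟩)

-- ===== VERDICT (by name: the statement is the Claim_ definition above) =====
theorem get_user_ids_with_max_messages_spec : Claim_equal_get_user_ids_with_max_messages := by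
  intro messages _ hpre
  obtain ⟨hne, _, hord⟩ := hpre
  unfold Spec_get_user_ids_with_max_messages
  -- both ports as folds over the extracted user-id list
  have hApe : get_user_ids_with_max_messages messages =
      ((pvA (pvIds messages)).2.1, (pvA (pvIds messages)).2.2) := by
    simp [get_user_ids_with_max_messages, pvA, pvIds, List.foldl_map]
  have hcounts : messages.foldl
      (fun counts message => counts.insert (pvSentBy message) (counts.getD (pvSentBy message) 0 + 1))
      PySem.Dict.empty = PySem.Dict.counter (pvIds messages) := by
    rw [← PySem.Dict.foldl_insert_getD_add_one_eq_counter, pvIds, List.foldl_map]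
  set l := pvIds messages with hl
  have hlne : l ≠ [] := by
    rw [hl, pvIds]
    simpa using hne
  obtain ⟨x, xs, hxl⟩ := List.exists_cons_of_ne_nil hlne
  obtain ⟨hd, hnn, h0, hle, hat, hset⟩ := pvAInv l
  obtain ⟨k0, hk0, hk0eq⟩ := hat hlne
  -- the maximum count
  have hMC : (pvMaxCount l : Int) = (pvA l).2.2 := by
    rw [pvMaxCount_eq l k0 hk0 (fun k => by have := hle k; have := hk0eq; omega)]
    exact hk0eq
  -- the count table of B
  have hofne : PySem.Set.ofList l ≠ [] := by
    intro h
    have : x ∈ PySem.Set.ofList l := (PySem.Set.mem_ofList l x).mpr (by simp [hxl])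
    simp [h] at this
  have hsz : (PySem.Dict.counter l).size ≠ 0 := by
    intro h
    have hit : (PySem.Dict.counter l).items = [] := List.length_eq_zero_iff.mp h
    rw [PySem.Dict.items_counter] at hit
    exact hofne (List.map_eq_nil_iff.mp hit)
  have hvals : (PySem.Dict.counter l).values = (PySem.Set.ofList l).map (fun k => (l.count k : Int)) := by
    have := PySem.Dict.values_eq_map_keys (PySem.Dict.counter l) (PySem.Dict.nodup_keys_counter l) 0
    rw [this, PySem.Dict.keys_counter]
    exact List.map_congr_left (fun k _ => PySem.Dict.getD_counter l k)
  have hvne : (PySem.Dict.counter l).values ≠ [] := by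
    rw [hvals]
    intro h
    exact hofne (List.map_eq_nil_iff.mp h)
  obtain ⟨m, hm⟩ : ∃ m, PySem.List.max? (PySem.Dict.counter l).values (fun v => v) = some m := by
    cases hmm : PySem.List.max? (PySem.Dict.counter l).values (fun v => v) with
    | none => exact absurd ((PySem.List.max?_eq_none_iff _ _).mp hmm) hvne
    | some m => exact ⟨m, rfl⟩
  have hmA : m = (pvA l).2.2 := by
    refine le_antisymm ?_ ?_
    · have := PySem.List.max?_mem hm
      rw [hvals] at this
      obtain ⟨v, _, rfl⟩ := List.mem_map.mp this
      exact hle v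
    · have hmem : ((l.count k0 : Int)) ∈ (PySem.Dict.counter l).values := by
        rw [hvals]
        exact List.mem_map.mpr ⟨k0, (PySem.Set.mem_ofList l k0).mpr hk0, rfl⟩
      have := PySem.List.max?_isMax hm _ hmem
      omega
  -- B's winner set
  have hBset : (PySem.Dict.counter l).items.foldl
      (fun s p => if p.2 == m then PySem.Set.add s p.1 else s) PySem.Set.empty =
      (PySem.Set.ofList l).filter (fun k => ((l.count k : Int) == m)) := by
    rw [PySem.Dict.items_counter, List.foldl_map]
    exact pvFoldAddFilter (PySem.Set.ofList l) _ [] (PySem.Set.nodup_ofList l) (by simp)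
  -- the ordered winner lists agree under Pre_
  have hfilters : (pvLast l).filter (fun u => ((l.count u : Int) == (pvA l).2.2)) =
      (PySem.Set.ofList l).filter (fun k => ((l.count k : Int) == m)) := by
    have hW := hord
    unfold pvWinnersFirst pvWinnersLast at hW
    have e1 : (pvLast l).filter (fun u => ((l.count u : Int) == (pvA l).2.2)) =
        ((PySem.Set.ofList l.reverse).reverse).filter (fun u => l.count u == pvMaxCount l) := by
      unfold pvLast
      apply List.filter_congr
      intro v _
      rw [← hMC]
      by_cases h : l.count v = pvMaxCount l <;> simp [h]
    have e2 : (PySem.Set.ofList l).filter (fun k => ((l.count k : Int) == m)) =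
        (PySem.Set.ofList l).filter (fun u => l.count u == pvMaxCount l) := by
      apply List.filter_congr
      intro v _
      rw [hmA, ← hMC]
      by_cases h : l.count v = pvMaxCount l <;> simp [h]
    rw [e1, e2, hW]
  -- assemble
  rw [hApe]
  simp only [get_user_ids_with_max_messages_alt, hcounts]
  rw [if_neg hsz]
  simp only [hm, Option.getD_some, hBset]
  rw [hset, hfilters, hmA]
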